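-- pv_equiv track=rewrite | github.com/limanling/uiuc_ie_pipeline_coarse_grained | aida_event/evaluation_evaluation.py | search_phrase_tail
-- ===== SOURCE A (Python) =====
-- def search_phrase_tail(token_idx, sentence_sequence, length_offset=0):
--     try:
--         token_label = sentence_sequence[token_idx + 1]['token_prediction']
--     except IndexError:
--         return length_offset
--     if token_label[0] == "I":
--         length_offset = search_phrase_tail(token_idx + 1, sentence_sequence, length_offset=length_offset + 1)
--     return length_offset
-- ===== SOURCE B (Python) =====
-- def search_phrase_tail(token_idx, sentence_sequence, length_offset=0):
--     run = 0
--     while True: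
--         try:
--             label = sentence_sequence[token_idx + run + 1]['token_prediction']
--         except IndexError:
--             break
--         if label[0] != "I":
--             break
--         run += 1
--     return length_offset + run
-- ===== Notes on version B (the rewrite author's own statement) =====
-- stated objective: simpler
-- what changed: Replaces the recursion that threads length_offset through an accumulator with a flat while loop that counts the run of 'I'-labels and adds it to length_offset once at the end.
import Mathlib
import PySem

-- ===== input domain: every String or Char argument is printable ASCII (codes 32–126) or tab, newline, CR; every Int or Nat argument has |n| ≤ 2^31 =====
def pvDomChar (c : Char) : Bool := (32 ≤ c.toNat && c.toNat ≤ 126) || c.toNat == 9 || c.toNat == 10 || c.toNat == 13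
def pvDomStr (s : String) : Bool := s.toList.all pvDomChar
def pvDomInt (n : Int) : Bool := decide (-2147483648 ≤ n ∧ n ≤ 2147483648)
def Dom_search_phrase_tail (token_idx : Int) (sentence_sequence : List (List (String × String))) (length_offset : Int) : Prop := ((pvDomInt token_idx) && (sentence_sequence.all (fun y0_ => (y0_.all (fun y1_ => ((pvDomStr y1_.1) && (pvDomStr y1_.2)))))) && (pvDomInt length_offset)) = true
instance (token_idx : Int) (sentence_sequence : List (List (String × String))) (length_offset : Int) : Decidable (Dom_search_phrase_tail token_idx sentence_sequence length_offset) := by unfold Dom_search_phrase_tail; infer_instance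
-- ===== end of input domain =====

-- ===== PORT A =====
-- B replaces A's accumulator-threading recursion by a flat while loop counting
-- the run of 'I'-labels, added to length_offset once; objective: simpler.
-- Port of A, step for step.  Where Python raises (KeyError on a missing
-- 'token_prediction' key, IndexError on an empty label) the PySem lookups
-- return none; those inputs are excluded by Pre_ below and the `.getD`
-- defaults are never reached there.
def search_phrase_tail (token_idx : Int) (sentence_sequence : List (List (String × String))) (length_offset : Int) : Int :=
  match h : PySem.List.pyGet? sentence_sequence (token_idx + 1) with
  | none => length_offset
  | some d =>
    let token_label := ((PySem.Dict.mk d).get? "token_prediction").getD ""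
    if PySem.Str.pyGet? token_label 0 = some 'I' then
      search_phrase_tail (token_idx + 1) sentence_sequence (length_offset + 1)
    else
      length_offset
termination_by ((sentence_sequence.length : Int) - (token_idx + 1)).toNat
decreasing_by
  have hne : PySem.List.pyGet? sentence_sequence (token_idx + 1) ≠ none := by simp [h]
  rw [ne_eq, PySem.List.pyGet?_eq_none_iff, not_not] at hne
  unfold PySem.Raise.InRange at hne
  omega

-- ===== PORT B =====
-- the while loop of Source B: state `run`; the indexing try/except is pyGet?
-- (none = IndexError → break), the `label[0] != "I"` break is the else branch.
def sptRun (sentence_sequence : List (List (String × String))) (token_idx : Int) (run : Int) : Int :=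
  match h : PySem.List.pyGet? sentence_sequence (token_idx + run + 1) with
  | none => run
  | some d =>
    let label := ((PySem.Dict.mk d).get? "token_prediction").getD ""
    if PySem.Str.pyGet? label 0 ≠ some 'I' then
      run
    else
      sptRun sentence_sequence token_idx (run + 1)
termination_by ((sentence_sequence.length : Int) - (token_idx + run + 1)).toNat
decreasing_by
  have hne : PySem.List.pyGet? sentence_sequence (token_idx + run + 1) ≠ none := by simp [h]
  rw [ne_eq, PySem.List.pyGet?_eq_none_iff, not_not] at hne
  unfold PySem.Raise.InRange at hne
  omega

def search_phrase_tail_alt (token_idx : Int) (sentence_sequence : List (List (String × String))) (length_offset : Int) : Int :=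
  length_offset + sptRun sentence_sequence token_idx 0

-- ===== PRECONDITION & SPEC =====
-- Pre_ admits exactly the inputs on which Python A returns normally: walking
-- the chain of entries A visits (indices token_idx+1, token_idx+2, ...,
-- Python-resolved, i.e. wrapping once when token_idx+1 is negative), every
-- visited entry up to and including the first non-'I' one must carry a
-- 'token_prediction' key with a nonempty label; otherwise A raises
-- KeyError / IndexError.
def sptGood (d : List (String × String)) : Bool :=
  match (PySem.Dict.mk d).get? "token_prediction" with
  | some s => !(s == "")
  | none => false
def sptIsI (d : List (String × String)) : Bool :=
  match (PySem.Dict.mk d).get? "token_prediction" with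
  | some s => PySem.Str.pyGet? s 0 == some 'I'
  | none => false
def sptChain (token_idx : Int) (sentence_sequence : List (List (String × String))) : List (List (String × String)) :=
  let j := token_idx + 1
  if j < -(sentence_sequence.length : Int) then []
  else if j < 0 then sentence_sequence.drop ((sentence_sequence.length : Int) + j).toNat ++ sentence_sequence
  else sentence_sequence.drop j.toNat
def Pre_search_phrase_tail (token_idx : Int) (sentence_sequence : List (List (String × String))) (length_offset : Int) : Prop :=
  (match (sptChain token_idx sentence_sequence).dropWhile sptIsI with
   | [] => true
   | d :: _ => sptGood d) = true
instance (token_idx : Int) (sentence_sequence : List (List (String × String))) (length_offset : Int) : Decidable (Pre_search_phrase_tail token_idx sentence_sequence length_offset) := by unfold Pre_search_phrase_tail; infer_instance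

def pvWitness_search_phrase_tail : Int × (List (List (String × String))) × Int :=
  (0, [[("token_prediction", "B-x")], [("token_prediction", "I-x")], [("token_prediction", "O")]], 0)

def Spec_search_phrase_tail (token_idx : Int) (sentence_sequence : List (List (String × String))) (length_offset : Int) (out : Int) : Prop := out = search_phrase_tail_alt token_idx sentence_sequence length_offset
instance (token_idx : Int) (sentence_sequence : List (List (String × String))) (length_offset : Int) (out : Int) : Decidable (Spec_search_phrase_tail token_idx sentence_sequence length_offset out) := by unfold Spec_search_phrase_tail; infer_instance

-- ===== CLAIM (what is proved, stated in full; the proofs are below) =====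
def Claim_equal_search_phrase_tail : Prop := ∀ (token_idx : Int) (sentence_sequence : List (List (String × String))) (length_offset : Int), Dom_search_phrase_tail token_idx sentence_sequence length_offset → Pre_search_phrase_tail token_idx sentence_sequence length_offset → Spec_search_phrase_tail token_idx sentence_sequence length_offset (search_phrase_tail token_idx sentence_sequence length_offset)

-- ===== LEMMAS AND PROOFS =====

-- A at position ti+r with accumulator off equals off - r + the loop's result
-- from run = r (both visit indices ti+r+1, ti+r+2, …).
lemma spt_eq_run (ss : List (List (String × String))) :
    ∀ (m : Nat) (ti r off : Int), (((ss.length : Int) - (ti + r + 1)).toNat ≤ m) →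
      search_phrase_tail (ti + r) ss off = off - r + sptRun ss ti r := by
  intro m
  induction m with
  | zero =>
    intro ti r off h
    have hn : PySem.List.pyGet? ss (ti + r + 1) = none := by
      rw [PySem.List.pyGet?_eq_none_iff]
      unfold PySem.Raise.InRange
      omega
    rw [search_phrase_tail, sptRun]
    split
    · ring
    · rename_i d hd
      rw [hn] at hd; cases hd
  | succ m ih =>
    intro ti r off h
    rw [search_phrase_tail, sptRun]
    cases hd : PySem.List.pyGet? ss (ti + r + 1) with
    | none =>
      simp only [hd]
      ring
    | some d =>
      simp only [hd]
      have hr : -(ss.length : Int) ≤ ti + r + 1 ∧ ti + r + 1 < (ss.length : Int) := by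
        have hne : PySem.List.pyGet? ss (ti + r + 1) ≠ none := by simp [hd]
        rw [ne_eq, PySem.List.pyGet?_eq_none_iff, not_not] at hne
        unfold PySem.Raise.InRange at hne
        omega
      split_ifs with hI hJ
      · exact absurd hI hJ
      · have := ih ti (r + 1) (off + 1) (by omega)
        rw [show ti + (r + 1) = ti + r + 1 from by ring] at this
        rw [this]; ring
      · ring

-- ===== VERDICT (by name: the statement is the Claim_ definition above) =====
theorem search_phrase_tail_spec : Claim_equal_search_phrase_tail := by
  intro tk ss off _ _
  unfold Spec_search_phrase_tail search_phrase_tail_alt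
  have := spt_eq_run ss (((ss.length : Int) - (tk + 0 + 1)).toNat) tk 0 off le_rfl
  simpa using this
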